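-- pv_equiv track=rewrite | github.com/rlgafter/recipe_editor | app_mysql.py | _trim_empty_ingredients_from_end
-- ===== SOURCE A (Python) =====
-- def _trim_empty_ingredients_from_end(ingredients):
--     """Remove empty ingredients that are not followed by non-empty ingredients."""
--     if not ingredients:
--         return ingredients
--
--     # Work backwards to find the last non-empty ingredient
--     last_non_empty_index = -1
--     for i in range(len(ingredients) - 1, -1, -1):
--         description = ingredients[i].get('description', '').strip()
--         if description:
--             last_non_empty_index = i
--             break
--
--     # If no non-empty ingredients found, return empty list
--     if last_non_empty_index == -1:
--         return []
--
--     # Return ingredients up to and including the last non-empty one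
--     return ingredients[:last_non_empty_index + 1]
-- ===== SOURCE B (Python) =====
-- def _trim_empty_ingredients_from_end(ingredients):
--     """Remove empty ingredients that are not followed by non-empty ingredients."""
--     if not ingredients:
--         return ingredients
--     kept = []
--     keep = False
--     for item in reversed(ingredients):
--         if keep or item.get('description', '').strip():
--             keep = True
--             kept.append(item)
--     kept.reverse()
--     return kept
-- ===== Notes on version B (the rewrite author's own statement) =====
-- stated objective: alternative
-- what changed: Replaces the backward index search plus slice with a single pass over the reversed list carrying a keep flag, collecting items once the first non-empty description is seen and reversing the result; no index arithmetic or slicing.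
import Mathlib
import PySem

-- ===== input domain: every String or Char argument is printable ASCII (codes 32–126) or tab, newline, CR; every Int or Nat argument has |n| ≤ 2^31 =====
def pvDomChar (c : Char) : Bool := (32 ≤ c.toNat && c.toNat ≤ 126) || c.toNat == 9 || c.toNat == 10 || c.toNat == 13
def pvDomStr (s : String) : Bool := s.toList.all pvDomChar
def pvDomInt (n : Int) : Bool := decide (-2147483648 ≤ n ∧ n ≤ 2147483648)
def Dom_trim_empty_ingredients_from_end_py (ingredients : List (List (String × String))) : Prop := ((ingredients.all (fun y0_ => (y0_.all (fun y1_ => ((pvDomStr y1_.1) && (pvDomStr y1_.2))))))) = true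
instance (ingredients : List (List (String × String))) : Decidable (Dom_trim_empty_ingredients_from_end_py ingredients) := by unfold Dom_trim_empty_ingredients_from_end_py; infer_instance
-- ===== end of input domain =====

-- B replaces A's backward index search + slice with one pass over the reversed list carrying a keep flag; same cost, different control flow.


-- ===== PORT A =====
-- the backward for-loop with break: first index in the countdown range whose description is non-empty, else -1
def pvALoop (ingredients : List (List (String × String))) : List Int → Int
  | [] => -1
  | i :: rest =>
    let description := PySem.Str.strip ((PySem.Dict.mk (PySem.List.pyGetD ingredients i [])).getD "description" "")
    if description ≠ "" then i else pvALoop ingredients rest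

def trim_empty_ingredients_from_end_py (ingredients : List (List (String × String))) : List (List (String × String)) :=
  if ingredients = [] then ingredients
  else
    let last_non_empty_index := pvALoop ingredients (PySem.List.pyRange ((ingredients.length : Int) - 1) (-1) (-1))
    if last_non_empty_index = -1 then []
    else PySem.List.slice ingredients none (some (last_non_empty_index + 1))

-- ===== PORT B =====
-- one step of B's loop over reversed(ingredients): state = (keep flag, kept items in reverse order)
def pvBStep (acc : Bool × List (List (String × String))) (item : List (String × String)) : Bool × List (List (String × String)) :=
  if acc.1 || (PySem.Str.strip ((PySem.Dict.mk item).getD "description" "") ≠ "") then (true, acc.2 ++ [item]) else acc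

def trim_empty_ingredients_from_end_py_alt (ingredients : List (List (String × String))) : List (List (String × String)) :=
  if ingredients = [] then ingredients
  else ((ingredients.reverse.foldl pvBStep (false, [])).2).reverse

-- ===== PRECONDITION & SPEC =====
def Spec_trim_empty_ingredients_from_end_py (ingredients : List (List (String × String))) (out : List (List (String × String))) : Prop := out = trim_empty_ingredients_from_end_py_alt ingredients
instance (ingredients : List (List (String × String))) (out : List (List (String × String))) : Decidable (Spec_trim_empty_ingredients_from_end_py ingredients out) := by unfold Spec_trim_empty_ingredients_from_end_py; infer_instance

-- ===== CLAIM (what is proved, stated in full; the proofs are below) =====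
def Claim_equal_trim_empty_ingredients_from_end_py : Prop := ∀ (ingredients : List (List (String × String))), Dom_trim_empty_ingredients_from_end_py ingredients → Spec_trim_empty_ingredients_from_end_py ingredients (trim_empty_ingredients_from_end_py ingredients)

-- ===== LEMMAS AND PROOFS =====

-- A without its empty guard
def pvACore (xs : List (List (String × String))) : List (List (String × String)) :=
  let last := pvALoop xs (PySem.List.pyRange ((xs.length : Int) - 1) (-1) (-1))
  if last = -1 then [] else PySem.List.slice xs none (some (last + 1))

-- B without its empty guard
def pvBCore (xs : List (List (String × String))) : List (List (String × String)) :=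
  ((xs.reverse.foldl pvBStep (false, [])).2).reverse

theorem pvA_eq_core (xs : List (List (String × String))) :
    trim_empty_ingredients_from_end_py xs = pvACore xs := by
  cases xs with
  | nil => rfl
  | cons a t => rfl

theorem pvB_eq_core (xs : List (List (String × String))) :
    trim_empty_ingredients_from_end_py_alt xs = pvBCore xs := by
  cases xs with
  | nil => rfl
  | cons a t => rfl

-- once the flag is set, B's loop appends every remaining item
theorem pvBStep_true (ys : List (List (String × String))) (l : List (List (String × String))) :
    ys.foldl pvBStep (true, l) = (true, l ++ ys) := by
  induction ys generalizing l with
  | nil => simp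
  | cons y t ih => simp [pvBStep, ih]

-- A's loop ignores an appended element when every index is in range of xs
theorem pvALoop_append (xs : List (List (String × String))) (x : List (String × String))
    (r : List Int) (h : ∀ i ∈ r, 0 ≤ i ∧ i < (xs.length : Int)) :
    pvALoop (xs ++ [x]) r = pvALoop xs r := by
  induction r with
  | nil => rfl
  | cons i t ih =>
    have hi := h i (List.mem_cons_self ..)
    obtain ⟨k, hk⟩ : ∃ k : Nat, i = (k : Int) := ⟨i.toNat, (Int.toNat_of_nonneg hi.1).symm⟩
    have hklt : k < xs.length := by omega
    have hget : PySem.List.pyGetD (xs ++ [x]) i [] = PySem.List.pyGetD xs i [] := by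
      subst hk
      simp [PySem.List.pyGetD_natCast, List.getD, List.getElem?_append_left hklt]
    by_cases hc : PySem.Str.strip ((PySem.Dict.mk (PySem.List.pyGetD xs i [])).getD "description" "") = ""
    · simpa [pvALoop, hget, hc] using ih (fun j hj => h j (List.mem_cons_of_mem _ hj))
    · simp [pvALoop, hget, hc]

-- A's loop returns -1 or a member of its index list
theorem pvALoop_mem (xs : List (List (String × String))) (r : List Int) :
    pvALoop xs r = -1 ∨ pvALoop xs r ∈ r := by
  induction r with
  | nil => exact Or.inl rfl
  | cons i t ih =>
    by_cases hc : PySem.Str.strip ((PySem.Dict.mk (PySem.List.pyGetD xs i [])).getD "description" "") = ""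
    · rcases ih with h | h
      · exact Or.inl (by simpa [pvALoop, hc] using h)
      · refine Or.inr ?_
        simpa [pvALoop, hc] using List.mem_cons_of_mem i h
    · refine Or.inr ?_
      simp [pvALoop, hc]

theorem pvCore_eq (xs : List (List (String × String))) : pvACore xs = pvBCore xs := by
  induction xs using List.reverseRecOn with
  | nil => rfl
  | append_singleton xs x ih =>
    have hlen : ((xs ++ [x]).length : Int) - 1 = (xs.length : Int) := by
      simp
    have hrange : PySem.List.pyRange (((xs ++ [x]).length : Int) - 1) (-1) (-1)
        = (xs.length : Int) :: PySem.List.pyRange ((xs.length : Int) - 1) (-1) (-1) := by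
      rw [hlen, PySem.List.pyRange_neg_one_cons (by omega)]
    have hgetx : PySem.List.pyGetD (xs ++ [x]) ((xs.length : Int)) [] = x := by
      simp [PySem.List.pyGetD_natCast, List.getD]
    have hmem : ∀ i ∈ PySem.List.pyRange ((xs.length : Int) - 1) (-1) (-1),
        0 ≤ i ∧ i < (xs.length : Int) := by
      intro i hi
      rw [PySem.List.mem_pyRange_neg_one] at hi
      omega
    by_cases hc : PySem.Str.strip ((PySem.Dict.mk x).getD "description" "") = ""
    · -- last element empty: both reduce to their value on xs
      have hb : pvBCore (xs ++ [x]) = pvBCore xs := by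
        simp only [pvBCore, List.reverse_append, List.reverse_singleton, List.singleton_append,
          List.foldl_cons]
        have hstep : pvBStep (false, []) x = (false, []) := by
          simp [pvBStep, hc]
        rw [hstep]
      have hl : pvALoop (xs ++ [x]) (PySem.List.pyRange (((xs ++ [x]).length : Int) - 1) (-1) (-1))
          = pvALoop xs (PySem.List.pyRange ((xs.length : Int) - 1) (-1) (-1)) := by
        rw [hrange]
        have hstep : pvALoop (xs ++ [x]) ((xs.length : Int) :: PySem.List.pyRange ((xs.length : Int) - 1) (-1) (-1))
            = pvALoop (xs ++ [x]) (PySem.List.pyRange ((xs.length : Int) - 1) (-1) (-1)) := by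
          simp [pvALoop, hgetx, hc]
        rw [hstep, pvALoop_append xs x _ hmem]
      have ha : pvACore (xs ++ [x]) = pvACore xs := by
        unfold pvACore
        rw [hl]
        rcases pvALoop_mem xs (PySem.List.pyRange ((xs.length : Int) - 1) (-1) (-1)) with h | h
        · simp [h]
        · rw [PySem.List.mem_pyRange_neg_one] at h
          have hne : pvALoop xs (PySem.List.pyRange ((xs.length : Int) - 1) (-1) (-1)) ≠ -1 := by omega
          rw [if_neg hne, if_neg hne,
            PySem.List.slice_to (xs ++ [x]) (by omega), PySem.List.slice_to xs (by omega),
            List.take_append_of_le_length (by omega)]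
      rw [ha, hb, ih]
    · -- last element non-empty: both return the whole list
      have hb : pvBCore (xs ++ [x]) = xs ++ [x] := by
        simp only [pvBCore, List.reverse_append, List.reverse_singleton, List.singleton_append,
          List.foldl_cons]
        have hstep : pvBStep (false, []) x = (true, [x]) := by
          simp [pvBStep, hc]
        rw [hstep, pvBStep_true]
        simp
      have hl : pvALoop (xs ++ [x]) (PySem.List.pyRange (((xs ++ [x]).length : Int) - 1) (-1) (-1))
          = (xs.length : Int) := by
        rw [hrange]
        simp [pvALoop, hgetx, hc]
      have ha : pvACore (xs ++ [x]) = xs ++ [x] := by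
        unfold pvACore
        rw [hl, if_neg (by omega), PySem.List.slice_to (xs ++ [x]) (by omega)]
        refine List.take_of_length_le ?_
        have hlen' : (xs ++ [x]).length = xs.length + 1 := by simp
        omega
      rw [ha, hb]

-- ===== VERDICT (by name: the statement is the Claim_ definition above) =====
theorem trim_empty_ingredients_from_end_py_spec : Claim_equal_trim_empty_ingredients_from_end_py := by
  intro xs _
  unfold Spec_trim_empty_ingredients_from_end_py
  rw [pvA_eq_core, pvB_eq_core, pvCore_eq]
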